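-- pv_equiv track=rewrite | github.com/s7vcengineering/splytpayments-web | scripts/scrape-blustreet.py | parse_slug
-- ===== SOURCE A (Python) =====
-- SLUG_MAKE_MAP = {
--     "lamborghini": "Lamborghini",
--     "ferrari": "Ferrari",
--     "mclaren": "McLaren",
--     "maserati": "Maserati",
--     "rolls-royce": "Rolls Royce",
--     "bentley": "Bentley",
--     "porsche": "Porsche",
--     "mercedes-benz": "Mercedes-Benz",
--     "mercedes-maybach": "Mercedes-Benz",
--     "bmw": "BMW",
--     "audi": "Audi",
--     "cadillac": "Cadillac",
--     "chevrolet": "Chevrolet",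
--     "chevy": "Chevrolet",
--     "corvette": "Chevrolet",
--     "dodge": "Dodge",
--     "aston-martin": "Aston Martin",
--     "bugatti": "Bugatti",
--     "tesla": "Tesla",
--     "range-rover": "Range Rover",
--     "land-rover": "Land Rover",
--     "jaguar": "Jaguar",
--     "gmc": "GMC",
--     "lincoln": "Lincoln",
--     "lexus": "Lexus",
--     "infiniti": "Infiniti",
--     "alfa-romeo": "Alfa Romeo",
--     "genesis": "Genesis",
-- }
--
-- SLUG_MODEL_PREFIX = {
--     "corvette": "Corvette",
--     "mercedes-maybach": "Maybach",
-- }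
--
-- def parse_slug(slug):
--     """Parse the URL slug to extract make and model.
--
--     Slugs look like: rent-ferrari-roma, rent-lamborghini-urus-bronze,
--     rent-mercedes-benz-amg-g63-blue, rent-corvette-c8-e-ray-convertible-white
--     """
--     # Remove the "rent-" prefix
--     name = slug
--     if name.startswith("rent-"):
--         name = name[5:]
--
--     make = None
--     model = None
--
--     # Try matching against known make slug prefixes (longest first)
--     sorted_prefixes = sorted(SLUG_MAKE_MAP.keys(), key=len, reverse=True)
--     for prefix in sorted_prefixes:
--         if name.startswith(prefix + "-") or name == prefix:
--             make = SLUG_MAKE_MAP[prefix]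
--             remainder = name[len(prefix):].lstrip("-")
--             # Some slugs need a model prefix (e.g., "corvette" -> make=Chevrolet, model starts with "Corvette")
--             model_prefix = SLUG_MODEL_PREFIX.get(prefix, "")
--             if remainder:
--                 model_parts = remainder.replace("-", " ").title()
--                 if model_prefix:
--                     model = f"{model_prefix} {model_parts}"
--                 else:
--                     model = model_parts
--             elif model_prefix:
--                 model = model_prefix
--             break
--
--     if not make:
--         # Fallback: assume first word is make
--         parts = name.split("-")
--         if parts:
--             make = parts[0].title()
--             if len(parts) > 1:
--                 model = " ".join(parts[1:]).title()
--
--     return make, model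
-- ===== SOURCE B (Python) =====
-- SLUG_MAKE_MAP = {
--     "lamborghini": "Lamborghini",
--     "ferrari": "Ferrari",
--     "mclaren": "McLaren",
--     "maserati": "Maserati",
--     "rolls-royce": "Rolls Royce",
--     "bentley": "Bentley",
--     "porsche": "Porsche",
--     "mercedes-benz": "Mercedes-Benz",
--     "mercedes-maybach": "Mercedes-Benz",
--     "bmw": "BMW",
--     "audi": "Audi",
--     "cadillac": "Cadillac",
--     "chevrolet": "Chevrolet",
--     "chevy": "Chevrolet",
--     "corvette": "Chevrolet",
--     "dodge": "Dodge",
--     "aston-martin": "Aston Martin",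
--     "bugatti": "Bugatti",
--     "tesla": "Tesla",
--     "range-rover": "Range Rover",
--     "land-rover": "Land Rover",
--     "jaguar": "Jaguar",
--     "gmc": "GMC",
--     "lincoln": "Lincoln",
--     "lexus": "Lexus",
--     "infiniti": "Infiniti",
--     "alfa-romeo": "Alfa Romeo",
--     "genesis": "Genesis",
-- }
--
-- SLUG_MODEL_PREFIX = {
--     "corvette": "Corvette",
--     "mercedes-maybach": "Maybach",
-- }
--
--
-- def _make_model(prefix, name):
--     """Build the (make, model) pair once a make prefix has been matched."""
--     make = SLUG_MAKE_MAP[prefix]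
--     remainder = name[len(prefix):].lstrip("-")
--     model_prefix = SLUG_MODEL_PREFIX.get(prefix, "")
--     if remainder:
--         model = remainder.replace("-", " ").title()
--         return make, (model_prefix + " " + model) if model_prefix else model
--     return make, (model_prefix or None)
--
--
-- def parse_slug(slug):
--     """Parse the URL slug to extract make and model.
--
--     Single unsorted pass over the make map, keeping the longest prefix
--     that matches at a '-' boundary (no sorting of the key set).
--     """
--     name = slug[5:] if slug.startswith("rent-") else slug
--
--     best = None
--     for prefix in SLUG_MAKE_MAP:
--         if (name == prefix or name.startswith(prefix + "-")) and (
--             best is None or len(prefix) > len(best)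
--         ):
--             best = prefix
--
--     if best is not None:
--         return _make_model(best, name)
--
--     parts = name.split("-")
--     model = " ".join(parts[1:]).title() if len(parts) > 1 else None
--     return parts[0].title(), model
-- ===== Notes on version B (the rewrite author's own statement) =====
-- stated objective: alternative
-- what changed: A sorts all 28 make-map keys by length on every call and scans the sorted list for the first boundary match; B makes a single pass over the unsorted map keys keeping the longest boundary-matching prefix seen so far (no sort), then formats the result once.
import Mathlib
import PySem

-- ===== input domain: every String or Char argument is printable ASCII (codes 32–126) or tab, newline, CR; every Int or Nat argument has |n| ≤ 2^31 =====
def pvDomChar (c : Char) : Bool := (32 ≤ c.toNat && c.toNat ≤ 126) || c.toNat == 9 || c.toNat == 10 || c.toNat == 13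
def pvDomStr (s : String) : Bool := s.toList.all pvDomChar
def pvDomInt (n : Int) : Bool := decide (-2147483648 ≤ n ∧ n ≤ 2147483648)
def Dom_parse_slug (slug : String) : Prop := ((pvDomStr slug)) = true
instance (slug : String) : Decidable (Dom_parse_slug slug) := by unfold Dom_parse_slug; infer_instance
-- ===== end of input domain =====

-- B replaces A's sort-all-keys-by-length-then-scan with a single unsorted pass that keeps the
-- longest boundary-matching key (objective: alternative; same post-match formatting).

-- shared exact primitives (hand-ports of Python builtins PySem does not provide):
-- str.title(): a letter is uppercased iff the previous character is not a letter — exact on the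
-- ASCII domain (where "cased" = alphabetic)
def pyTitleGo : List Char → Bool → List Char
  | [], _ => []
  | c :: rest, prevAlpha =>
      (if PySem.Chars.isalpha c then
        (if prevAlpha then PySem.Chars.lowerChar c else PySem.Chars.upperChar c)
       else c) :: pyTitleGo rest (PySem.Chars.isalpha c)

def pyTitle (s : String) : String := String.ofList (pyTitleGo s.toList false)

-- str.lstrip("-"): drop leading '-' characters (exact: the strip set is the single char '-')
def lstripHyphens (s : String) : String := String.ofList (s.toList.dropWhile (fun c => c == '-'))

def slugMakeMap : PySem.Dict String String := PySem.Dict.mk [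
  ("lamborghini", "Lamborghini"), ("ferrari", "Ferrari"), ("mclaren", "McLaren"),
  ("maserati", "Maserati"), ("rolls-royce", "Rolls Royce"), ("bentley", "Bentley"),
  ("porsche", "Porsche"), ("mercedes-benz", "Mercedes-Benz"), ("mercedes-maybach", "Mercedes-Benz"),
  ("bmw", "BMW"), ("audi", "Audi"), ("cadillac", "Cadillac"), ("chevrolet", "Chevrolet"),
  ("chevy", "Chevrolet"), ("corvette", "Chevrolet"), ("dodge", "Dodge"),
  ("aston-martin", "Aston Martin"), ("bugatti", "Bugatti"), ("tesla", "Tesla"),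
  ("range-rover", "Range Rover"), ("land-rover", "Land Rover"), ("jaguar", "Jaguar"),
  ("gmc", "GMC"), ("lincoln", "Lincoln"), ("lexus", "Lexus"), ("infiniti", "Infiniti"),
  ("alfa-romeo", "Alfa Romeo"), ("genesis", "Genesis")]

def slugModelPrefix : PySem.Dict String String := PySem.Dict.mk [
  ("corvette", "Corvette"), ("mercedes-maybach", "Maybach")]

-- ===== PORT A =====
-- the for-loop over the sorted prefixes, breaking on the first match (make is then the map value —
-- present by construction, so the getD default "" is never produced)
def loopA : List String → String → Option (String × Option String)
  | [], _ => none
  | p :: rest, name =>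
      if PySem.Str.startswith name (p ++ "-") || name == p then
        let make := PySem.Dict.getD slugMakeMap p ""
        let remainder := lstripHyphens (PySem.Str.slice name (some (PySem.Str.len p)) none)
        let modelPrefix := PySem.Dict.getD slugModelPrefix p ""
        if remainder ≠ "" then
          let modelParts := pyTitle (PySem.Str.replace remainder "-" " ")
          some (make, if modelPrefix ≠ "" then some (modelPrefix ++ " " ++ modelParts) else some modelParts)
        else
          some (make, if modelPrefix ≠ "" then some modelPrefix else none)
      else loopA rest name

-- A's `if not make:` fallback block (model keeps its value where A does not reassign it)
def fallbackA (name : String) (model : Option String) : Option String × Option String :=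
  let parts := (PySem.Str.split? name "-").getD []   -- sep is the nonempty literal "-": split? is always `some`
  if parts ≠ [] then
    (some (pyTitle (PySem.List.pyGetD parts 0 "")),   -- parts[0]: safe, parts ≠ [] was just checked
     if 1 < PySem.List.len parts then
       some (pyTitle (PySem.Str.join " " (PySem.List.slice parts (some 1) none)))
     else model)
  else (none, model)

def parse_slug (slug : String) : Option String × Option String :=
  let name := if PySem.Str.startswith slug "rent-" then PySem.Str.slice slug (some 5) none else slug
  let sortedPrefixes := PySem.List.sorted (PySem.Dict.keys slugMakeMap) (fun p => PySem.Str.len p) true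
  match loopA sortedPrefixes name with
  | some (make, model) => if make ≠ "" then (some make, model) else fallbackA name model
  | none => fallbackA name none

-- ===== PORT B =====
def makeModelB (pfx name : String) : Option String × Option String :=
  let make := PySem.Dict.getD slugMakeMap pfx ""   -- pfx is a key of the map: KeyError impossible
  let remainder := lstripHyphens (PySem.Str.slice name (some (PySem.Str.len pfx)) none)
  let modelPrefix := PySem.Dict.getD slugModelPrefix pfx ""
  if remainder ≠ "" then
    let model := pyTitle (PySem.Str.replace remainder "-" " ")
    (some make, some (if modelPrefix ≠ "" then modelPrefix ++ " " ++ model else model))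
  else
    (some make, if modelPrefix ≠ "" then some modelPrefix else none)

-- single pass over the (unsorted) keys, keeping the longest match so far
def bestLoop : List String → String → Option String → Option String
  | [], _, best => best
  | p :: rest, name, best =>
      bestLoop rest name
        (if (name == p || PySem.Str.startswith name (p ++ "-")) &&
            (match best with
             | none => true
             | some b => decide (PySem.Str.len b < PySem.Str.len p)) then some p else best)

def parse_slug_alt (slug : String) : Option String × Option String :=
  let name := if PySem.Str.startswith slug "rent-" then PySem.Str.slice slug (some 5) none else slug
  match bestLoop (PySem.Dict.keys slugMakeMap) name none with
  | some best => makeModelB best name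
  | none =>
      let parts := (PySem.Str.split? name "-").getD []   -- sep is the nonempty literal "-": split? is always `some`
      (some (pyTitle (PySem.List.pyGetD parts 0 "")),    -- parts[0]: str.split never returns an empty list
       if 1 < PySem.List.len parts then
         some (pyTitle (PySem.Str.join " " (PySem.List.slice parts (some 1) none)))
       else none)

-- ===== PRECONDITION & SPEC =====
def Spec_parse_slug (slug : String) (out : Option String × Option String) : Prop := out = parse_slug_alt slug
instance (slug : String) (out : Option String × Option String) : Decidable (Spec_parse_slug slug out) := by unfold Spec_parse_slug; infer_instance

-- ===== CLAIM (what is proved, stated in full; the proofs are below) =====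
def Claim_equal_parse_slug : Prop := ∀ (slug : String), Dom_parse_slug slug → Spec_parse_slug slug (parse_slug slug)

-- ===== LEMMAS AND PROOFS =====

-- A's match condition on a prefix
def PA (name p : String) : Bool := PySem.Str.startswith name (p ++ "-") || name == p
-- B's match condition (the same test, written in B's order)
def PB (name p : String) : Bool := name == p || PySem.Str.startswith name (p ++ "-")

lemma PB_eq_PA (name p : String) : PB name p = PA name p := Bool.or_comm _ _

-- B's "is strictly longer than the best so far" test
def better (best : Option String) (p : String) : Bool :=
  match best with
  | none => true
  | some b => decide (PySem.Str.len b < PySem.Str.len p)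

lemma bestLoop_cons (x : String) (rest : List String) (name : String) (best : Option String) :
    bestLoop (x :: rest) name best =
      bestLoop rest name (if (PB name x && better best x) = true then some x else best) := by
  cases best <;> rfl

-- what loopA returns on a hit (a copy of its hit branch)
def bodyAOpt (p name : String) : Option (String × Option String) :=
  let make := PySem.Dict.getD slugMakeMap p ""
  let remainder := lstripHyphens (PySem.Str.slice name (some (PySem.Str.len p)) none)
  let modelPrefix := PySem.Dict.getD slugModelPrefix p ""
  if remainder ≠ "" then
    let modelParts := pyTitle (PySem.Str.replace remainder "-" " ")
    some (make, if modelPrefix ≠ "" then some (modelPrefix ++ " " ++ modelParts) else some modelParts)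
  else
    some (make, if modelPrefix ≠ "" then some modelPrefix else none)

set_option maxHeartbeats 2000000 in
lemma loopA_eq_find? (l : List String) (name : String) :
    loopA l name = (l.find? (PA name)).bind (fun p => bodyAOpt p name) := by
  induction l with
  | nil => rfl
  | cons p rest ih =>
      by_cases h : PA name p = true
      · rw [List.find?_cons_of_pos h, Option.bind_some]
        have h' : (PySem.Str.startswith name (p ++ "-") || name == p) = true := h
        simp only [loopA, if_pos h', bodyAOpt]
      · rw [List.find?_cons_of_neg h]
        have h' : ¬((PySem.Str.startswith name (p ++ "-") || name == p) = true) := h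
        simp only [loopA, if_neg h']
        exact ih

lemma bodyAOpt_spec (p name : String) :
    ∃ mdl, bodyAOpt p name = some (PySem.Dict.getD slugMakeMap p "", mdl) ∧
      (some (PySem.Dict.getD slugMakeMap p ""), mdl) = makeModelB p name := by
  unfold bodyAOpt makeModelB
  dsimp only
  by_cases hr : lstripHyphens (PySem.Str.slice name (some (PySem.Str.len p)) none) ≠ ""
  · by_cases hm : PySem.Dict.getD slugModelPrefix p "" ≠ ""
    · exact ⟨_, by rw [if_pos hr, if_pos hm], by rw [if_pos hr, if_pos hm]⟩
    · exact ⟨_, by rw [if_pos hr, if_neg hm], by rw [if_pos hr, if_neg hm]⟩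
  · by_cases hm : PySem.Dict.getD slugModelPrefix p "" ≠ ""
    · exact ⟨_, by rw [if_neg hr, if_pos hm], by rw [if_neg hr, if_pos hm]⟩
    · exact ⟨_, by rw [if_neg hr, if_neg hm], by rw [if_neg hr, if_neg hm]⟩

-- values of the make map are never the empty string
lemma make_ne_empty : ∀ p ∈ PySem.Dict.keys slugMakeMap, PySem.Dict.getD slugMakeMap p "" ≠ "" := by
  decide

-- a matching prefix is a prefix of name (as a char list)
lemma PA_isPrefix {name p : String} (h : PA name p = true) : p.toList <+: name.toList := by
  unfold PA at h
  rcases Bool.or_eq_true_iff.mp h with h | h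
  · have h' := (PySem.Chars.startswith_iff name.toList (p ++ "-").toList).mp (by simpa using h)
    rw [String.toList_append] at h'
    exact (List.prefix_append _ _).trans h'
  · have : name = p := by simpa using h
    subst this
    exact List.prefix_rfl

-- two matching prefixes of equal length are equal
lemma PA_unique {name p q : String} (hp : PA name p = true) (hq : PA name q = true)
    (h1 : PySem.Str.len p ≤ PySem.Str.len q) (h2 : PySem.Str.len q ≤ PySem.Str.len p) : p = q := by
  have hp' := PA_isPrefix hp
  have hq' := PA_isPrefix hq
  rw [PySem.Str.len_eq, PySem.Str.len_eq] at h1 h2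
  have hlen : p.toList.length = q.toList.length := by omega
  have := List.prefix_of_prefix_length_le hp' hq' (le_of_eq hlen)
  exact String.toList_inj.mp (List.IsPrefix.eq_of_length this hlen)

-- characterisation of A's scan over the length-sorted key list
lemma findA_mem {name p : String}
    (h : (PySem.List.sorted (PySem.Dict.keys slugMakeMap) (fun p => PySem.Str.len p) true).find? (PA name) = some p) :
    p ∈ PySem.Dict.keys slugMakeMap ∧ PA name p = true := by
  refine ⟨?_, List.find?_some h⟩
  have := List.mem_of_find?_eq_some h
  rwa [PySem.List.mem_sorted] at this

lemma findA_max {name p : String}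
    (h : (PySem.List.sorted (PySem.Dict.keys slugMakeMap) (fun p => PySem.Str.len p) true).find? (PA name) = some p) :
    ∀ q ∈ PySem.Dict.keys slugMakeMap, PA name q = true → PySem.Str.len q ≤ PySem.Str.len p := by
  intro q hq hPq
  rcases List.find?_eq_some_iff_append.mp h with ⟨hPp, as, bs, hsplit, hbefore⟩
  have hqmem : q ∈ PySem.List.sorted (PySem.Dict.keys slugMakeMap) (fun p => PySem.Str.len p) true := by
    rw [PySem.List.mem_sorted]; exact hq
  have hpair := PySem.List.sorted_pairwise_rev (PySem.Dict.keys slugMakeMap) (fun p => PySem.Str.len p)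
  rw [hsplit] at hqmem hpair
  rcases List.mem_append.mp hqmem with hqa | hqb
  · have := hbefore q hqa
    rw [hPq] at this
    exact absurd this (by simp)
  · rcases List.mem_cons.mp hqb with rfl | hqb
    · exact le_refl _
    · have := (List.pairwise_append.mp hpair).2.1
      exact (List.pairwise_cons.mp this).1 q hqb

lemma findA_none {name : String}
    (h : (PySem.List.sorted (PySem.Dict.keys slugMakeMap) (fun p => PySem.Str.len p) true).find? (PA name) = none) :
    ∀ q ∈ PySem.Dict.keys slugMakeMap, PA name q = false := by
  intro q hq
  have := List.find?_eq_none.mp h q (by rw [PySem.List.mem_sorted]; exact hq)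
  simpa using this

-- characterisation of B's longest-so-far pass
lemma bestLoop_mono (l : List String) (name : String) :
    ∀ b, ∃ p, bestLoop l name (some b) = some p ∧ PySem.Str.len b ≤ PySem.Str.len p := by
  induction l with
  | nil => exact fun b => ⟨b, rfl, le_refl _⟩
  | cons x rest ih =>
      intro b
      rw [bestLoop_cons]
      by_cases hc : (PB name x && better (some b) x) = true
      · rw [if_pos hc]
        rcases ih x with ⟨p, hp, hlen⟩
        refine ⟨p, hp, ?_⟩
        have h2 := ((Bool.and_eq_true _ _) ▸ hc).2
        simp only [better, decide_eq_true_eq] at h2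
        exact le_of_lt (lt_of_lt_of_le h2 hlen)
      · rw [if_neg hc]
        exact ih b

lemma bestLoop_some_mem (l : List String) (name : String) :
    ∀ acc p, bestLoop l name acc = some p → acc = some p ∨ (p ∈ l ∧ PB name p = true) := by
  induction l with
  | nil => intro acc p h; exact Or.inl h
  | cons x rest ih =>
      intro acc p h
      rw [bestLoop_cons] at h
      rcases ih _ p h with hacc | ⟨hmem, hPB⟩
      · by_cases hc : (PB name x && better acc x) = true
        · rw [if_pos hc] at hacc
          obtain rfl : x = p := by injection hacc
          exact Or.inr ⟨List.mem_cons_self, ((Bool.and_eq_true _ _) ▸ hc).1⟩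
        · rw [if_neg hc] at hacc
          exact Or.inl hacc
      · exact Or.inr ⟨List.mem_cons_of_mem _ hmem, hPB⟩

lemma bestLoop_none (l : List String) (name : String) :
    ∀ acc, bestLoop l name acc = none → acc = none ∧ ∀ q ∈ l, PB name q = false := by
  induction l with
  | nil => intro acc h; exact ⟨h, by simp⟩
  | cons x rest ih =>
      intro acc h
      rw [bestLoop_cons] at h
      rcases ih _ h with ⟨hacc', hrest⟩
      by_cases hc : (PB name x && better acc x) = true
      · rw [if_pos hc] at hacc'
        exact absurd hacc' (by simp)
      · rw [if_neg hc] at hacc'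
        subst hacc'
        refine ⟨rfl, ?_⟩
        intro q hq
        rcases List.mem_cons.mp hq with rfl | hq
        · cases hPBq : PB name q with
          | false => rfl
          | true => exact absurd (by rw [hPBq]; rfl) hc
        · exact hrest q hq

lemma bestLoop_max (l : List String) (name : String) :
    ∀ acc q, q ∈ l → PB name q = true → ∀ p, bestLoop l name acc = some p →
      PySem.Str.len q ≤ PySem.Str.len p := by
  induction l with
  | nil => intro acc q hq _ p _; exact absurd hq List.not_mem_nil
  | cons x rest ih =>
      intro acc q hq hPB p h
      rw [bestLoop_cons] at h
      rcases List.mem_cons.mp hq with rfl | hq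
      · by_cases hc : (PB name q && better acc q) = true
        · rw [if_pos hc] at h
          rcases bestLoop_mono rest name q with ⟨p', hp', hlen⟩
          rw [h] at hp'
          obtain rfl : p' = p := (Option.some.inj hp').symm
          exact hlen
        · rw [if_neg hc] at h
          rw [Bool.and_eq_true, not_and] at hc
          have hbetter := hc hPB
          cases acc with
          | none => exact absurd rfl hbetter
          | some b =>
              have hle : PySem.Str.len q ≤ PySem.Str.len b := by
                by_contra hlt
                exact hbetter (by simp only [better, decide_eq_true_eq]; omega)
              rcases bestLoop_mono rest name b with ⟨p'', hp', hlen⟩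
              rw [h] at hp'
              obtain rfl : p'' = p := (Option.some.inj hp').symm
              exact le_trans hle hlen
      · exact ih _ q hq hPB p h

-- str.split with a nonempty separator never returns the empty list
lemma splitOn_go_ne_nil (sep : List Char) :
    ∀ fuel l cur acc, PySem.Chars.splitOn.go sep fuel l cur acc ≠ [] := by
  intro fuel
  induction fuel with
  | zero => intro l cur acc; simp [PySem.Chars.splitOn.go]
  | succ n ih =>
      intro l cur acc
      cases l with
      | nil => simp [PySem.Chars.splitOn.go]
      | cons c rest =>
          simp only [PySem.Chars.splitOn.go]
          split
          · exact ih _ _ _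
          · exact ih _ _ _

lemma split_parts_ne_nil (name : String) : (PySem.Str.split? name "-").getD [] ≠ [] := by
  unfold PySem.Str.split? PySem.Chars.split?
  rw [if_neg (by decide)]
  simp only [Option.map_some, Option.getD_some, ne_eq, List.map_eq_nil_iff]
  unfold PySem.Chars.splitOn
  exact splitOn_go_ne_nil _ _ _ _ _

-- ===== VERDICT (by name: the statement is the Claim_ definition above) =====
set_option maxHeartbeats 2000000 in
theorem parse_slug_spec : Claim_equal_parse_slug := by
  intro slug _
  unfold Spec_parse_slug parse_slug parse_slug_alt
  dsimp only
  generalize (if PySem.Str.startswith slug "rent-" then PySem.Str.slice slug (some 5) none else slug) = name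
  rw [loopA_eq_find?]
  cases hA : (PySem.List.sorted (PySem.Dict.keys slugMakeMap) (fun p => PySem.Str.len p) true).find? (PA name) with
  | none =>
      cases hB : bestLoop (PySem.Dict.keys slugMakeMap) name none with
      | none =>
          show fallbackA name none =
            (some (pyTitle (PySem.List.pyGetD ((PySem.Str.split? name "-").getD []) 0 "")),
             if 1 < PySem.List.len ((PySem.Str.split? name "-").getD []) then
               some (pyTitle (PySem.Str.join " " (PySem.List.slice ((PySem.Str.split? name "-").getD []) (some 1) none)))
             else none)
          unfold fallbackA
          dsimp only
          rw [if_pos (split_parts_ne_nil name)]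
      | some p' =>
          rcases bestLoop_some_mem _ name none p' hB with h | ⟨hmem, hPB⟩
          · exact absurd h (by simp)
          · have := findA_none hA p' hmem
            rw [PB_eq_PA, this] at hPB
            exact absurd hPB (by simp)
  | some p =>
      cases hB : bestLoop (PySem.Dict.keys slugMakeMap) name none with
      | none =>
          rcases findA_mem hA with ⟨hmem, hPA⟩
          have := (bestLoop_none _ name none hB).2 p hmem
          rw [PB_eq_PA, hPA] at this
          exact absurd this (by simp)
      | some p' =>
          rcases findA_mem hA with ⟨hmem, hPA⟩
          rcases bestLoop_some_mem _ name none p' hB with h | ⟨hmem', hPB'⟩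
          · exact absurd h (by simp)
          · have hPA' : PA name p' = true := by rw [← PB_eq_PA]; exact hPB'
            have h1 : PySem.Str.len p' ≤ PySem.Str.len p := findA_max hA p' hmem' hPA'
            have h2 : PySem.Str.len p ≤ PySem.Str.len p' :=
              bestLoop_max _ name none p hmem (by rw [PB_eq_PA]; exact hPA) p' hB
            obtain rfl : p' = p := PA_unique hPA' hPA h1 h2
            rcases bodyAOpt_spec p' name with ⟨mdl, hbody, hmm⟩
            simp only [Option.bind_some]
            rw [hbody]
            show (if PySem.Dict.getD slugMakeMap p' "" ≠ "" then
                    (some (PySem.Dict.getD slugMakeMap p' ""), mdl)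
                  else fallbackA name mdl) = makeModelB p' name
            rw [if_pos (make_ne_empty p' hmem)]
            exact hmm
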